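-- pv_equiv track=rewrite | github.com/Algorithm-P0/meanjung | 1try/8_greedy/algospot_1.py | solve
-- ===== SOURCE A (Python) =====
-- def solve(Russia, Korea):
--     Russia.sort()
--     Korea.sort()
--     win = 0
--     for R in Russia:
--         for i in range(len(Korea)):
--             if R <= Korea[i]:
--                 win+=1
--                 Korea.pop(i)
--                 break
--     return win
-- ===== SOURCE B (Python) =====
-- def solve(Russia, Korea):
--     rs = sorted(Russia)
--     ks = sorted(Korea)
--     win = i = j = 0
--     while i < len(rs) and j < len(ks):
--         if rs[i] <= ks[j]:
--             win += 1
--             i += 1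
--         j += 1
--     return win
-- ===== Notes on version B (the rewrite author's own statement) =====
-- stated objective: faster
-- what changed: Replaces A's per-element inner scan with pop() on the Korea list by a single two-pointer sweep over both sorted lists, and avoids mutating the arguments.
import Mathlib
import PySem

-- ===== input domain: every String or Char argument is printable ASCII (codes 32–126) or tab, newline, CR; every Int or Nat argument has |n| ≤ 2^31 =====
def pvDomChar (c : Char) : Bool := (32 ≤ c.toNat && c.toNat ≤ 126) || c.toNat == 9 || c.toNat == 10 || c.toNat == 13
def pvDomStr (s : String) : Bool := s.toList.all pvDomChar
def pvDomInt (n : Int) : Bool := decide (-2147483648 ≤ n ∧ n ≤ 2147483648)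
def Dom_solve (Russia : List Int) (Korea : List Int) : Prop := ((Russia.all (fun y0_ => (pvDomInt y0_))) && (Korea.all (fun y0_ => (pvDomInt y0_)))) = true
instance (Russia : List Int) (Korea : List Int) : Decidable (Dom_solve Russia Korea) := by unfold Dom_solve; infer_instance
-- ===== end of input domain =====

-- B replaces A's per-R inner scan-and-pop over Korea by one two-pointer sweep of both
-- sorted lists (and does not mutate its arguments; A sorts/pops them in place —
-- the equivalence proved here is about the RETURN value only).

-- ===== PORT A =====
-- A's inner loop: scan Korea left to right, on the first element with R <= it, pop it and break.
-- Returns the Korea list with that element removed, or none if no element matched.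
def innerA (r : Int) : List Int → Option (List Int)
  | [] => none
  | k :: ks => if r ≤ k then some ks else (innerA r ks).map (fun t => k :: t)

-- A's outer loop: for each R in (sorted) Russia, run the inner scan, win += 1 on a match.
def aloop : List Int → List Int → Int
  | [], _ => 0
  | r :: rs, ks =>
    match innerA r ks with
    | some ks' => 1 + aloop rs ks'
    | none => aloop rs ks

def solve (Russia : List Int) (Korea : List Int) : Int :=
  aloop (PySem.List.sorted Russia (fun x => x) false) (PySem.List.sorted Korea (fun x => x) false)

-- ===== PORT B =====
-- B's while loop over the two indices i (into rs) and j (into ks), as structural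
-- recursion on the two suffixes rs[i:], ks[j:].
def bloop : List Int → List Int → Int
  | [], _ => 0
  | _ :: _, [] => 0
  | r :: rs, k :: ks => if r ≤ k then 1 + bloop rs ks else bloop (r :: rs) ks

def solve_alt (Russia : List Int) (Korea : List Int) : Int :=
  bloop (PySem.List.sorted Russia (fun x => x) false) (PySem.List.sorted Korea (fun x => x) false)

-- ===== PRECONDITION & SPEC =====
def Spec_solve (Russia : List Int) (Korea : List Int) (out : Int) : Prop := out = solve_alt Russia Korea
instance (Russia : List Int) (Korea : List Int) (out : Int) : Decidable (Spec_solve Russia Korea out) := by unfold Spec_solve; infer_instance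

-- ===== CLAIM (what is proved, stated in full; the proofs are below) =====
def Claim_equal_solve : Prop := ∀ (Russia : List Int) (Korea : List Int), Dom_solve Russia Korea → Spec_solve Russia Korea (solve Russia Korea)

-- ===== LEMMAS AND PROOFS =====

-- The inner scan finds nothing in the empty list, so A's outer loop stays at 0.
theorem aloop_nil (rs : List Int) : aloop rs [] = 0 := by
  induction rs with
  | nil => rfl
  | cons r rs ih => simp [aloop, innerA, ih]

-- A head element k smaller than every remaining Russia element is dead weight:
-- the inner scan always steps over it, and popping deeper keeps it at the front.
theorem aloop_cons_drop (rs : List Int) (k : Int) (h : ∀ r ∈ rs, ¬ r ≤ k) :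
    ∀ ks : List Int, aloop rs (k :: ks) = aloop rs ks := by
  induction rs with
  | nil => intro ks; rfl
  | cons r rs ih =>
    intro ks
    have hk : ¬ r ≤ k := h r (List.mem_cons_self)
    have h' : ∀ r' ∈ rs, ¬ r' ≤ k := fun r' hr' => h r' (List.mem_cons_of_mem _ hr')
    simp only [aloop, innerA, if_neg hk]
    cases hinner : innerA r ks with
    | none => simp [ih h']
    | some ks' => simp [ih h']

-- Main invariant: on a ≤-sorted Russia list A's scan-and-pop loop computes the same
-- count as B's two-pointer sweep, for ANY Korea list.
theorem aloop_eq_bloop (rs : List Int) (hs : rs.Pairwise (fun a b => a ≤ b)) :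
    ∀ ks : List Int, aloop rs ks = bloop rs ks := by
  induction rs with
  | nil => intro ks; simp [aloop, bloop]
  | cons r rs ih =>
    have hhead : ∀ r' ∈ rs, r ≤ r' := (List.pairwise_cons.mp hs).1
    have hs' : rs.Pairwise (fun a b => a ≤ b) := (List.pairwise_cons.mp hs).2
    intro ks
    induction ks with
    | nil => simp [aloop_nil, bloop]
    | cons k kt ihk =>
      by_cases hrk : r ≤ k
      · simp [aloop, innerA, bloop, hrk, ih hs']
      · have hdrop : ∀ r' ∈ rs, ¬ r' ≤ k := by
          intro r' hr' hle
          exact hrk (le_trans (hhead r' hr') hle)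
        simp only [aloop, innerA, if_neg hrk, bloop]
        cases hinner : innerA r kt with
        | none =>
          simp only [Option.map_none]
          rw [aloop_cons_drop rs k hdrop kt]
          simpa [aloop, hinner] using ihk
        | some ks' =>
          simp only [Option.map_some]
          rw [aloop_cons_drop rs k hdrop ks']
          simpa [aloop, hinner] using ihk

-- ===== VERDICT (by name: the statement is the Claim_ definition above) =====
theorem solve_spec : Claim_equal_solve := by
  intro Russia Korea _
  unfold Spec_solve solve solve_alt
  exact aloop_eq_bloop _ (PySem.List.sorted_pairwise Russia (fun x => x) ) _
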